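-- pv_equiv track=rewrite | github.com/kstavro/identical-sentence-counter | identical_sentence_counter/comparison_utils.py | wordlists_are_nearly_identical
-- ===== SOURCE A (Python) =====
-- from typing import List, Dict
-- from copy import copy
--
-- def wordlists_are_identical(wordlist1: List[str], wordlist2: List[str]) -> bool:
--     """Checks if two lists of words are identical.
--
--     Two lists of words are identical if they have the same words in the same
--     order."""
--
--     return wordlist1 == wordlist2
--
-- def wordlists_are_nearly_identical(wordlist1: List[str], wordlist2: List[str]) -> bool:
--     """Checks if wordlist1 is nearly identical to wordlist2,
--     assuming len(wordlist1) == len(wordlist2) + 1.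
--
--     Two lists of words are nearly identical if we can remove one word from one
--     list and they become identical."""
--
--     len_wordlist1 = len(wordlist1)
--     len_wordlist2 = len(wordlist2)
--
--     # can be removed if we are 100% certain from outside
--     # of the method that the lengths of the lists are appropriate.
--     assert (
--         len_wordlist1 == len_wordlist2 + 1
--     ), "The length of {} must be 1 more than the length of {}.".format(
--         wordlist1, wordlist2
--     )
--
--     # in case wordlist1 has only one word we can directly return True
--     if len_wordlist1 == 1:
--         return True
--
--     # find the first index where the elements of the lists disagree
--     index_of_first_different_element = 0
--     while (
--         wordlist1[index_of_first_different_element]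
--         == wordlist2[index_of_first_different_element]
--     ):
--         # if we get to the last element of the first list
--         # we know the lists are nearly identical and can return True
--         if (
--             index_of_first_different_element == len_wordlist1 - 2
--         ):  # this is the second to last element
--             return True
--         index_of_first_different_element += 1
--
--     # pop the first different element from the first list
--     # be careful to pop it from a copy not spoil the original list
--     wordlist1_copy = copy(wordlist1)
--     wordlist1_copy.pop(index_of_first_different_element)
--
--     return wordlists_are_identical(wordlist1_copy, wordlist2)
-- ===== SOURCE B (Python) =====
-- from typing import List
--
--
-- def wordlists_are_nearly_identical(wordlist1: List[str], wordlist2: List[str]) -> bool: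
--     """Checks if wordlist1 is nearly identical to wordlist2,
--     assuming len(wordlist1) == len(wordlist2) + 1.
--
--     Two-ended scan: the common prefix length p and common suffix length s
--     together must cover all of wordlist2."""
--
--     len_wordlist1 = len(wordlist1)
--     len_wordlist2 = len(wordlist2)
--
--     assert (
--         len_wordlist1 == len_wordlist2 + 1
--     ), "The length of {} must be 1 more than the length of {}.".format(
--         wordlist1, wordlist2
--     )
--
--     p = 0
--     while p < len_wordlist2 and wordlist1[p] == wordlist2[p]:
--         p += 1
--
--     s = 0
--     while s < len_wordlist2 and wordlist1[len_wordlist1 - 1 - s] == wordlist2[len_wordlist2 - 1 - s]: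
--         s += 1
--
--     return p + s >= len_wordlist2
-- ===== Notes on version B (the rewrite author's own statement) =====
-- stated objective: alternative
-- what changed: Replaced A's find-first-mismatch loop plus list copy/pop and recursive whole-list equality check with a two-ended scan computing common prefix and suffix lengths and an arithmetic verdict p + s >= len2, with no copying.
-- outside the precondition, e.g. on wordlists_are_nearly_identical([], []): A raises AssertionError, B raises AssertionError
import Mathlib
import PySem

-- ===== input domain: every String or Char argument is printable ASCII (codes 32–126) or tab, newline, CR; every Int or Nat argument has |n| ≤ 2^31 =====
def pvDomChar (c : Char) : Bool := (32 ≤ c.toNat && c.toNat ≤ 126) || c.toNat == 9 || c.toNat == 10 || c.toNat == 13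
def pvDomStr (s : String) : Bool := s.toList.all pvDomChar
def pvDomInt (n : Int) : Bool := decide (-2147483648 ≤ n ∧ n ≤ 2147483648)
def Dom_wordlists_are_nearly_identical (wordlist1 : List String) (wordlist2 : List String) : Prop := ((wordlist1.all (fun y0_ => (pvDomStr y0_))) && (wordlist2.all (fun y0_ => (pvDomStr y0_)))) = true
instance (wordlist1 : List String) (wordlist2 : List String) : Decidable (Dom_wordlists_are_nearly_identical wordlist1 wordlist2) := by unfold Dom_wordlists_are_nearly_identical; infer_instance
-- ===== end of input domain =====

-- B replaces A's find-first-mismatch + copy/pop + equality check by a two-ended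
-- prefix/suffix scan with an arithmetic verdict (no copying); same O(n) cost.

-- ===== PORT A =====
-- helper: wordlists_are_identical from the Python module
def wordlists_are_identical (wordlist1 : List String) (wordlist2 : List String) : Bool :=
  wordlist1 == wordlist2

-- the while-loop of A: find the first differing index, then pop it and compare;
-- the `| _, _ => none-index` arms are Python's IndexError (unreachable under Pre_)
def wniA_loop (w1 w2 : List String) (len1 : Nat) (i : Nat) : Bool :=
  match h1 : PySem.List.pyGet? w1 (i : Int), h2 : PySem.List.pyGet? w2 (i : Int) with
  | some a, some b =>
    if a == b then
      if i = len1 - 2 then true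
      else wniA_loop w1 w2 len1 (i + 1)
    else
      match PySem.List.pop? w1 (i : Int) with
      | some r => wordlists_are_identical r.2 w2
      | none => false
  | _, _ => false
termination_by w2.length - i
decreasing_by
  have hlt : i < w2.length := by
    rw [PySem.List.pyGet?_natCast] at h2
    exact (List.getElem?_eq_some_iff.mp h2).1
  omega

def wordlists_are_nearly_identical (wordlist1 : List String) (wordlist2 : List String) : Bool :=
  let len_wordlist1 := wordlist1.length
  -- the assert len1 == len2 + 1 is Pre_wordlists_are_nearly_identical
  if len_wordlist1 = 1 then true
  else wniA_loop wordlist1 wordlist2 len_wordlist1 0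

-- ===== PORT B =====
-- prefix loop: while p < len2 and wordlist1[p] == wordlist2[p]: p += 1
def wniB_pref (w1 w2 : List String) (len2 : Nat) (p : Nat) : Nat :=
  if p < len2 then
    match PySem.List.pyGet? w1 (p : Int), PySem.List.pyGet? w2 (p : Int) with
    | some a, some b => if a == b then wniB_pref w1 w2 len2 (p + 1) else p
    | _, _ => p   -- IndexError (unreachable under Pre_)
  else p
termination_by len2 - p

-- suffix loop: while s < len2 and wordlist1[len1-1-s] == wordlist2[len2-1-s]: s += 1
def wniB_suf (w1 w2 : List String) (len1 len2 : Nat) (s : Nat) : Nat :=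
  if s < len2 then
    match PySem.List.pyGet? w1 ((len1 : Int) - 1 - (s : Int)), PySem.List.pyGet? w2 ((len2 : Int) - 1 - (s : Int)) with
    | some a, some b => if a == b then wniB_suf w1 w2 len1 len2 (s + 1) else s
    | _, _ => s   -- IndexError (unreachable under Pre_)
  else s
termination_by len2 - s

def wordlists_are_nearly_identical_alt (wordlist1 : List String) (wordlist2 : List String) : Bool :=
  let len_wordlist1 := wordlist1.length
  let len_wordlist2 := wordlist2.length
  -- same assert as A: Pre_wordlists_are_nearly_identical
  let p := wniB_pref wordlist1 wordlist2 len_wordlist2 0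
  let s := wniB_suf wordlist1 wordlist2 len_wordlist1 len_wordlist2 0
  decide (len_wordlist2 ≤ p + s)

-- ===== PRECONDITION & SPEC =====
-- Pre_ excludes exactly the inputs on which both Pythons raise AssertionError:
-- the assert requires len(wordlist1) == len(wordlist2) + 1.
def Pre_wordlists_are_nearly_identical (wordlist1 : List String) (wordlist2 : List String) : Prop :=
  wordlist1.length = wordlist2.length + 1
instance (wordlist1 : List String) (wordlist2 : List String) : Decidable (Pre_wordlists_are_nearly_identical wordlist1 wordlist2) := by unfold Pre_wordlists_are_nearly_identical; infer_instance

def pvWitness_wordlists_are_nearly_identical : List String × List String := (["a", "b"], ["b"])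

def Spec_wordlists_are_nearly_identical (wordlist1 : List String) (wordlist2 : List String) (out : Bool) : Prop := out = wordlists_are_nearly_identical_alt wordlist1 wordlist2
instance (wordlist1 : List String) (wordlist2 : List String) (out : Bool) : Decidable (Spec_wordlists_are_nearly_identical wordlist1 wordlist2 out) := by unfold Spec_wordlists_are_nearly_identical; infer_instance

-- ===== CLAIM (what is proved, stated in full; the proofs are below) =====
def Claim_equal_wordlists_are_nearly_identical : Prop := ∀ (wordlist1 : List String) (wordlist2 : List String), Dom_wordlists_are_nearly_identical wordlist1 wordlist2 → Pre_wordlists_are_nearly_identical wordlist1 wordlist2 → Spec_wordlists_are_nearly_identical wordlist1 wordlist2 (wordlists_are_nearly_identical wordlist1 wordlist2)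

-- ===== LEMMAS AND PROOFS =====

-- recursive characterisation of A's result
def nearA : List String → List String → Bool
  | _, [] => true
  | [], _ :: _ => false
  | a :: as, b :: bs => if a = b then nearA as bs else as == b :: bs

-- common prefix length of two lists
def prefLen : List String → List String → Nat
  | a :: as, b :: bs => if a = b then prefLen as bs + 1 else 0
  | _, _ => 0

lemma prefLen_le_left : ∀ (x y : List String), prefLen x y ≤ x.length
  | a :: as, b :: bs => by
    simp only [prefLen, List.length_cons]
    split <;> [exact Nat.succ_le_succ (prefLen_le_left as bs); omega]
  | [], _ => by simp [prefLen]
  | _ :: _, [] => by simp [prefLen]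

lemma prefLen_le_right : ∀ (x y : List String), prefLen x y ≤ y.length
  | a :: as, b :: bs => by
    simp only [prefLen, List.length_cons]
    split <;> [exact Nat.succ_le_succ (prefLen_le_right as bs); omega]
  | [], _ => by simp [prefLen]
  | _ :: _, [] => by simp [prefLen]

lemma prefLen_char : ∀ (x y : List String) (k : Nat), k ≤ x.length → k ≤ y.length →
    (k ≤ prefLen x y ↔ x.take k = y.take k)
  | _, _, 0, _, _ => by simp
  | a :: as, b :: bs, k + 1, hx, hy => by
    simp only [prefLen, List.take_succ_cons, List.cons.injEq]
    by_cases hab : a = b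
    · subst hab
      rw [if_pos rfl]
      simp only [true_and, Nat.add_le_add_iff_right]
      exact prefLen_char as bs k (by simpa using hx) (by simpa using hy)
    · simp [hab]
  | [], _, k + 1, hx, _ => by simp at hx
  | _ :: _, [], k + 1, _, hy => by simp at hy

lemma prefLen_append : ∀ (x y u v : List String), prefLen x y < x.length → prefLen x y < y.length →
    prefLen (x ++ u) (y ++ v) = prefLen x y
  | a :: as, b :: bs, u, v, hx, hy => by
    by_cases hab : a = b
    · subst hab
      simp only [List.cons_append, prefLen, if_true, List.length_cons] at hx hy ⊢
      rw [prefLen_append as bs u v (by omega) (by omega)]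
    · simp [List.cons_append, prefLen, hab]
  | [], _, _, _, hx, _ => by simp [prefLen] at hx
  | _ :: _, [], _, _, _, hy => by simp [prefLen] at hy

lemma aLoop_eq (w1 w2 : List String) (i : Nat) (hlen : w1.length = w2.length + 1)
    (hi : i < w2.length) (ht : w1.take i = w2.take i) :
    wniA_loop w1 w2 w1.length i = nearA (w1.drop i) (w2.drop i) := by
  have hi1 : i < w1.length := by omega
  rw [wniA_loop]
  have g1 : PySem.List.pyGet? w1 (i : Int) = some w1[i] := by
    rw [PySem.List.pyGet?_natCast]; exact List.getElem?_eq_getElem hi1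
  have g2 : PySem.List.pyGet? w2 (i : Int) = some w2[i] := by
    rw [PySem.List.pyGet?_natCast]; exact List.getElem?_eq_getElem hi
  rw [g1, g2]
  dsimp only
  by_cases hab : w1[i] = w2[i]
  · rw [if_pos (by simpa using hab)]
    by_cases hend : i = w1.length - 2
    · rw [if_pos hend]
      have h2 : w2.length ≤ i + 1 := by omega
      rw [← List.getElem_cons_drop hi1, ← List.getElem_cons_drop hi, List.drop_eq_nil_of_le h2]
      simp [nearA, hab]
    · rw [if_neg hend]
      have hrec := aLoop_eq w1 w2 (i + 1) hlen (by omega) (by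
        rw [List.take_succ_eq_append_getElem hi1, List.take_succ_eq_append_getElem hi, ht, hab])
      rw [hrec, ← List.getElem_cons_drop hi1, ← List.getElem_cons_drop hi]
      simp [nearA, hab]
  · rw [if_neg (by simpa using hab)]
    rw [PySem.List.pop?_natCast w1 i hi1]
    rw [← List.getElem_cons_drop hi1, ← List.getElem_cons_drop hi]
    simp only [nearA, if_neg hab, wordlists_are_identical]
    rw [Bool.eq_iff_iff]
    simp only [beq_iff_eq]
    rw [List.getElem_cons_drop hi, List.eraseIdx_eq_take_drop_succ, ht]
    have hl : (w2.take i).length = i := by simp [List.length_take]; omega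
    constructor
    · intro h
      have h2 := congrArg (List.drop i) h
      rwa [List.drop_left' hl] at h2
    · intro h
      rw [h, List.take_append_drop]
termination_by w2.length - i

lemma prefLen_nil : ∀ (x : List String), prefLen x [] = 0 := by
  intro x; cases x <;> rfl

lemma nearA_nil : ∀ (x : List String), nearA x [] = true := by
  intro x; cases x <;> rfl

lemma pref_eq (w1 w2 : List String) (p : Nat) (hlt : w2.length < w1.length) (hp : p ≤ w2.length) :
    wniB_pref w1 w2 w2.length p = p + prefLen (w1.drop p) (w2.drop p) := by
  rw [wniB_pref]
  by_cases h : p < w2.length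
  · rw [if_pos h]
    have hp1 : p < w1.length := by omega
    have g1 : PySem.List.pyGet? w1 (p : Int) = some w1[p] := by
      rw [PySem.List.pyGet?_natCast]; exact List.getElem?_eq_getElem hp1
    have g2 : PySem.List.pyGet? w2 (p : Int) = some w2[p] := by
      rw [PySem.List.pyGet?_natCast]; exact List.getElem?_eq_getElem h
    rw [g1, g2]
    dsimp only
    rw [← List.getElem_cons_drop hp1, ← List.getElem_cons_drop h]
    by_cases hab : w1[p] = w2[p]
    · rw [if_pos (by simpa using hab)]
      rw [pref_eq w1 w2 (p + 1) hlt (by omega)]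
      simp only [prefLen, if_pos hab]
      omega
    · rw [if_neg (by simpa using hab)]
      simp [prefLen, hab]
  · rw [if_neg h]
    rw [List.drop_eq_nil_of_le (show w2.length ≤ p by omega), prefLen_nil]
    omega
termination_by w2.length - p

lemma suf_eq (w1 w2 : List String) (s : Nat) (hlen : w1.length = w2.length + 1)
    (hs : s ≤ w2.length) :
    wniB_suf w1 w2 w1.length w2.length s = s + prefLen (w1.reverse.drop s) (w2.reverse.drop s) := by
  rw [wniB_suf]
  by_cases h : s < w2.length
  · rw [if_pos h]
    have h1 : w1.length - 1 - s < w1.length := by omega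
    have h2 : w2.length - 1 - s < w2.length := by omega
    have e1 : ((w1.length : Int) - 1 - (s : Int)) = ((w1.length - 1 - s : Nat) : Int) := by omega
    have e2 : ((w2.length : Int) - 1 - (s : Int)) = ((w2.length - 1 - s : Nat) : Int) := by omega
    have g1 : PySem.List.pyGet? w1 ((w1.length : Int) - 1 - (s : Int)) = some w1[w1.length - 1 - s] := by
      rw [e1, PySem.List.pyGet?_natCast]; exact List.getElem?_eq_getElem h1
    have g2 : PySem.List.pyGet? w2 ((w2.length : Int) - 1 - (s : Int)) = some w2[w2.length - 1 - s] := by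
      rw [e2, PySem.List.pyGet?_natCast]; exact List.getElem?_eq_getElem h2
    rw [g1, g2]
    dsimp only
    have hr1 : s < w1.reverse.length := by simpa using by omega
    have hr2 : s < w2.reverse.length := by simpa using h
    have gr1 : w1.reverse[s] = w1[w1.length - 1 - s] := List.getElem_reverse (by simpa using by omega)
    have gr2 : w2.reverse[s] = w2[w2.length - 1 - s] := List.getElem_reverse (by simpa using h)
    rw [← List.getElem_cons_drop hr1, ← List.getElem_cons_drop hr2, gr1, gr2]
    by_cases hab : w1[w1.length - 1 - s] = w2[w2.length - 1 - s]
    · rw [if_pos (by simpa using hab)]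
      rw [suf_eq w1 w2 (s + 1) hlen (by omega)]
      simp only [prefLen, if_pos hab]
      omega
    · rw [if_neg (by simpa using hab)]
      simp [prefLen, hab]
  · rw [if_neg h]
    rw [List.drop_eq_nil_of_le (show w2.reverse.length ≤ s by simp; omega), prefLen_nil]
    omega
termination_by w2.length - s

lemma key_lemma : ∀ (w2 w1 : List String), w1.length = w2.length + 1 →
    nearA w1 w2 = decide (w2.length ≤ prefLen w1 w2 + prefLen w1.reverse w2.reverse) := by
  intro w2
  induction w2 with
  | nil =>
    intro w1 _
    simp [nearA_nil, prefLen_nil]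
  | cons b bs ih =>
    intro w1 h
    cases w1 with
    | nil => simp at h
    | cons a as =>
      have hlen : as.length = bs.length + 1 := by simpa using h
      have hrl : as.reverse.length = bs.length + 1 := by simpa using hlen
      by_cases hab : a = b
      · subst hab
        rw [show nearA (a :: as) (a :: bs) = nearA as bs from by simp [nearA]]
        rw [ih as hlen]
        have hpre : prefLen (a :: as) (a :: bs) = prefLen as bs + 1 := by simp [prefLen]
        rw [hpre, List.reverse_cons, List.reverse_cons]
        have hSle : prefLen as.reverse bs.reverse ≤ bs.length := by
          simpa using prefLen_le_right as.reverse bs.reverse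
        by_cases hfull : prefLen as.reverse bs.reverse = bs.length
        · -- suffix scan consumed all of bs: both sides are true
          have htk : as.reverse.take bs.length = bs.reverse.take bs.length := by
            rw [← hfull]
            exact (prefLen_char as.reverse bs.reverse _ (by omega) (by simp; omega)).mp le_rfl
          have hS' : bs.length ≤ prefLen (as.reverse ++ [a]) (bs.reverse ++ [a]) := by
            rw [prefLen_char _ _ bs.length (by simp; omega) (by simp)]
            rw [List.take_append_of_le_length (by omega), List.take_append_of_le_length (by simp)]
            simpa using htk
          simp only [decide_eq_decide, List.length_cons]
          omega
        · have hSlt : prefLen as.reverse bs.reverse < bs.length := by omega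
          rw [prefLen_append as.reverse bs.reverse [a] [a] (by omega) (by simp; omega)]
          simp only [decide_eq_decide, List.length_cons]
          omega
      · rw [show nearA (a :: as) (b :: bs) = (as == b :: bs) from by simp [nearA, hab]]
        have hpre : prefLen (a :: as) (b :: bs) = 0 := by simp [prefLen, hab]
        rw [hpre, List.reverse_cons, List.reverse_cons]
        rw [Bool.eq_iff_iff]
        simp only [beq_iff_eq, decide_eq_true_eq]
        constructor
        · intro he
          subst he
          have hx : bs.length + 1 ≤ prefLen ((bs.reverse ++ [b]) ++ [a]) (bs.reverse ++ [b]) := by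
            rw [prefLen_char _ _ (bs.length + 1) (by simp) (by simp)]
            rw [List.take_append_of_le_length (by simp)]
          simpa [List.reverse_cons] using hx
        · intro hle
          have htk := (prefLen_char (as.reverse ++ [a]) (bs.reverse ++ [b]) (bs.length + 1)
            (by simp; omega) (by simp)).mp (by simpa using hle)
          rw [List.take_append_of_le_length (by omega)] at htk
          rw [List.take_of_length_le (by rw [hrl]), List.take_of_length_le (by simp)] at htk
          have : as.reverse = (b :: bs).reverse := by simpa [List.reverse_cons] using htk
          exact List.reverse_injective this

-- ===== VERDICT (by name: the statement is the Claim_ definition above) =====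
theorem wordlists_are_nearly_identical_spec : Claim_equal_wordlists_are_nearly_identical := by
  intro w1 w2 _ hpre
  unfold Pre_wordlists_are_nearly_identical at hpre
  unfold Spec_wordlists_are_nearly_identical
  simp only [wordlists_are_nearly_identical, wordlists_are_nearly_identical_alt]
  rw [pref_eq w1 w2 0 (by omega) (by omega), suf_eq w1 w2 0 hpre (by omega)]
  simp only [List.drop_zero, Nat.zero_add]
  rw [← key_lemma w2 w1 hpre]
  by_cases h1 : w1.length = 1
  · rw [if_pos h1]
    have : w2 = [] := List.length_eq_zero_iff.mp (by omega)
    subst this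
    rw [nearA_nil]
  · rw [if_neg h1]
    have h0 : 0 < w2.length := by omega
    rw [aLoop_eq w1 w2 0 hpre h0 (by simp)]
    simp
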